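-- pv_equiv track=rewrite | github.com/eric-wieser/codejam | 2016/1A/b/main.py | solve
-- ===== SOURCE A (Python) =====
-- from collections import Counter
--
-- def solve(N, lists):
-- 	c = Counter()
--
-- 	for l in lists:
-- 		c.update(l)
--
-- 	needed = set()
--
-- 	for height, count in c.items():
-- 		if count % 2 != 0:
-- 			needed.add(height)
--
-- 	needed = sorted(needed)
-- 	assert len(needed) == N
--
-- 	return ' '.join(str(n) for n in needed)
-- ===== SOURCE B (Python) =====
-- def solve(N, lists):
-- 	a = sorted(x for l in lists for x in l)
-- 	needed = []
-- 	i = 0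
-- 	n = len(a)
-- 	while i < n:
-- 		j = i + 1
-- 		while j < n and a[j] == a[i]:
-- 			j += 1
-- 		if (j - i) % 2 == 1:
-- 			needed.append(a[i])
-- 		i = j
-- 	assert len(needed) == N
-- 	return ' '.join(str(x) for x in needed)
-- ===== Notes on version B (the rewrite author's own statement) =====
-- stated objective: alternative
-- what changed: B sorts the flattened multiset of all elements up front and then makes one run-length scan over adjacent equal runs, keeping heights whose run length is odd (already in sorted order); no Counter/hash map, no per-key filter pass, and no sort of a key set at the end.
import Mathlib
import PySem

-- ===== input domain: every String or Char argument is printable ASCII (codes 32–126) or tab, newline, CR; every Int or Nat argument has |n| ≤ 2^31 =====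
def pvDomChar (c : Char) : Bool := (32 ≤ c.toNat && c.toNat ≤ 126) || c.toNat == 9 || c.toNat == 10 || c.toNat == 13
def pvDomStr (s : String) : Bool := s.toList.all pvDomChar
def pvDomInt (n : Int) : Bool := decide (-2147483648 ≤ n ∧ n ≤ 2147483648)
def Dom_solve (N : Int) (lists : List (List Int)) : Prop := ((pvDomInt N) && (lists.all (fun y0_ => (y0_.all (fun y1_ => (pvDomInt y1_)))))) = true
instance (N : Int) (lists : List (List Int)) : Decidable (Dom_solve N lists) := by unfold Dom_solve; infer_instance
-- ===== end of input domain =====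

-- B sorts the flattened multiset first and then run-length-scans adjacent equal runs,
-- keeping heights with an odd run length (already sorted); no Counter and no key sort.
-- Proved equal on Pre_ (the inputs where A's assert passes).

-- ===== PORT A =====
-- Counter(); for l in lists: c.update(l); filter odd counts into a set; sort; join
def solve (N : Int) (lists : List (List Int)) : String :=
  let c : PySem.Dict Int Int :=
    lists.foldl (fun d l => l.foldl (fun d x => d.modify x 0 (· + 1)) d) PySem.Dict.empty
  let needed : PySem.Set Int :=
    c.items.foldl (fun s kv => if PySem.Int.mod kv.2 2 ≠ 0 then PySem.Set.add s kv.1 else s)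
      PySem.Set.empty
  let sortedNeeded := PySem.List.sorted needed (fun x => x) false
  -- the 'assert len(needed) == N' raises when it fails: those inputs are excluded by Pre_solve
  PySem.Str.join " " (sortedNeeded.map PySem.Int.toStr)

-- ===== PORT B =====
-- the inner while loop advances j over the run of elements equal to a[i]; here the run is
-- xs.takeWhile (== x) and the scan resumes at rest = xs.dropWhile (== x)
def runScan (a : List Int) : List Int :=
  match a with
  | [] => []
  | x :: xs =>
    let run := xs.takeWhile (fun y => y == x)
    let rest := xs.dropWhile (fun y => y == x)
    if (1 + run.length) % 2 = 1 then x :: runScan rest else runScan rest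
termination_by a.length
decreasing_by
  all_goals
    simp only [List.length_cons]
    exact Nat.lt_succ_of_le (List.length_dropWhile_le _ _)

def solve_alt (N : Int) (lists : List (List Int)) : String :=
  let a := PySem.List.sorted lists.flatten (fun x => x) false
  let needed := runScan a
  -- same 'assert len(needed) == N'; excluded by Pre_solve
  PySem.Str.join " " (needed.map PySem.Int.toStr)

-- ===== PRECONDITION & SPEC =====
-- Pre_ excludes exactly the inputs on which A's (and B's) assert fails and AssertionError is
-- raised: the number of heights occurring an odd number of times must equal N.
def Pre_solve (N : Int) (lists : List (List Int)) : Prop :=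
  (((PySem.List.dedup lists.flatten).countP
      (fun h => lists.flatten.count h % 2 = 1) : Int) = N)
instance (N : Int) (lists : List (List Int)) : Decidable (Pre_solve N lists) := by
  unfold Pre_solve; infer_instance

def pvWitness_solve : Int × List (List Int) := (1, [[3], [3], [5]])

def Spec_solve (N : Int) (lists : List (List Int)) (out : String) : Prop := out = solve_alt N lists
instance (N : Int) (lists : List (List Int)) (out : String) : Decidable (Spec_solve N lists out) := by unfold Spec_solve; infer_instance

-- ===== CLAIM (what is proved, stated in full; the proofs are below) =====
def Claim_equal_solve : Prop := ∀ (N : Int) (lists : List (List Int)), Dom_solve N lists → Pre_solve N lists → Spec_solve N lists (solve N lists)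

-- ===== LEMMAS AND PROOFS =====

-- A's counter loop is Counter(flatten(lists))
lemma counter_of_foldl (lists : List (List Int)) :
    lists.foldl (fun d l => l.foldl (fun d x => d.modify x 0 (· + 1)) d) PySem.Dict.empty
      = PySem.Dict.counter lists.flatten := by
  rw [PySem.Dict.counter_eq_foldl, List.foldl_flatten]

-- membership in A's conditional-add fold
lemma mem_foldl_cond_add (x : Int) (p : Int → Prop) [DecidablePred p]
    (ks : List Int) (s0 : PySem.Set Int) :
    x ∈ ks.foldl (fun s k => if p k then PySem.Set.add s k else s) s0
      ↔ x ∈ s0 ∨ (x ∈ ks ∧ p x) := by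
  induction ks generalizing s0 with
  | nil => simp
  | cons k ks ih =>
    simp only [List.foldl_cons, ih]
    by_cases h : p k
    · simp only [h, if_pos, PySem.Set.mem_add, List.mem_cons]
      constructor
      · rintro ((hs | rfl) | hk)
        · exact Or.inl hs
        · exact Or.inr ⟨Or.inl rfl, h⟩
        · exact Or.inr ⟨Or.inr hk.1, hk.2⟩
      · rintro (hs | ⟨(rfl | hk), hp⟩)
        · exact Or.inl (Or.inl hs)
        · exact Or.inl (Or.inr rfl)
        · exact Or.inr ⟨hk, hp⟩
    · simp only [h, if_neg, not_false_iff, List.mem_cons]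
      constructor
      · rintro (hs | hk)
        · exact Or.inl hs
        · exact Or.inr ⟨Or.inr hk.1, hk.2⟩
      · rintro (hs | ⟨(rfl | hk), hp⟩)
        · exact Or.inl hs
        · exact absurd hp h
        · exact Or.inr ⟨hk, hp⟩

lemma nodup_foldl_cond_add (p : Int → Prop) [DecidablePred p]
    (ks : List Int) (s0 : PySem.Set Int) (h0 : s0.Nodup) :
    (ks.foldl (fun s k => if p k then PySem.Set.add s k else s) s0).Nodup := by
  induction ks generalizing s0 with
  | nil => exact h0
  | cons k ks ih =>
    simp only [List.foldl_cons]
    apply ih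
    split
    · exact PySem.Set.nodup_add _ _ h0
    · exact h0

-- PySem.Int.mod of a cast count by 2 is the Nat remainder
lemma mod_count_cast (c : Nat) : PySem.Int.mod (c : Int) 2 = ((c % 2 : Nat) : Int) := by
  exact_mod_cast PySem.Int.mod_natCast c 2

-- membership in A's needed set: the heights with odd total count
lemma mem_A_set (lists : List (List Int)) (x : Int) :
    (x ∈ (PySem.Dict.counter lists.flatten).items.foldl
        (fun s kv => if PySem.Int.mod kv.2 2 ≠ 0 then PySem.Set.add s kv.1 else s)
        PySem.Set.empty)
      ↔ (x ∈ lists.flatten ∧ lists.flatten.count x % 2 = 1) := by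
  simp only [PySem.Set.empty]
  rw [PySem.Dict.items_counter, List.foldl_map]
  simp only []
  rw [mem_foldl_cond_add x
    (fun k => PySem.Int.mod ((lists.flatten.count k : Nat) : Int) 2 ≠ 0)
    (PySem.Set.ofList lists.flatten)]
  simp only [PySem.Set.mem_ofList, List.not_mem_nil, false_or, mod_count_cast]
  constructor
  · rintro ⟨hmem, hodd⟩
    exact ⟨hmem, by omega⟩
  · rintro ⟨hmem, hodd⟩
    exact ⟨hmem, by omega⟩

-- in a sorted list x :: xs, every element left after dropping the run of x is strictly above x
lemma rest_gt (x : Int) (xs : List Int) (hle : ∀ y ∈ xs, x ≤ y) (hp : xs.Pairwise (· ≤ ·)) :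
    ∀ y ∈ xs.dropWhile (fun y => y == x), x < y := by
  intro y hy
  have hsub : (xs.dropWhile (fun y => y == x)).Sublist xs := List.dropWhile_sublist _
  have hps : (xs.dropWhile (fun y => y == x)).Pairwise (· ≤ ·) := hp.sublist hsub
  cases hrest : xs.dropWhile (fun y => y == x) with
  | nil => simp [hrest] at hy
  | cons h t =>
    have hne : ¬ ((h == x) = true) := by
      have := List.head_dropWhile_not (fun y => y == x) (l := xs) (w := by simp [hrest])
      simpa [hrest] using this
    have hxh : x < h := by
      have : x ≤ h := hle h (hsub.mem (by simp [hrest]))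
      rcases lt_or_eq_of_le this with h1 | h1
      · exact h1
      · exact absurd (by simp [← h1]) hne
    rw [hrest] at hy hps
    rcases List.mem_cons.mp hy with rfl | hyt
    · exact hxh
    · exact lt_of_lt_of_le hxh ((List.pairwise_cons.mp hps).1 y hyt)

-- count of x in a sorted x :: xs is 1 + run length
lemma count_head_run (x : Int) (xs : List Int) (hle : ∀ y ∈ xs, x ≤ y)
    (hp : xs.Pairwise (· ≤ ·)) :
    (x :: xs).count x = 1 + (xs.takeWhile (fun y => y == x)).length := by
  have hdrop := rest_gt x xs hle hp
  have h1 : (xs.takeWhile (fun y => y == x)).count x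
      = (xs.takeWhile (fun y => y == x)).length := by
    apply List.count_eq_length.mpr
    intro y hy
    exact (by simpa using List.mem_takeWhile_imp hy : y = x).symm
  have h2 : (xs.dropWhile (fun y => y == x)).count x = 0 := by
    apply List.count_eq_zero.mpr
    intro hc; exact absurd rfl (ne_of_gt (hdrop x hc))
  have hx : xs.count x = (xs.takeWhile (fun y => y == x)).length := by
    conv_lhs => rw [← List.takeWhile_append_dropWhile (p := fun y => y == x) (l := xs)]
    rw [List.count_append, h1, h2]
    omega
  rw [List.count_cons_self, hx]
  omega

-- count of y ≠ x survives dropping the head run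
lemma count_other_run (x y : Int) (hne : y ≠ x) (xs : List Int) :
    (x :: xs).count y = (xs.dropWhile (fun y => y == x)).count y := by
  have h1 : (xs.takeWhile (fun y => y == x)).count y = 0 := by
    apply List.count_eq_zero.mpr
    intro hc
    exact hne (by simpa using List.mem_takeWhile_imp hc)
  have hx : xs.count y = (xs.dropWhile (fun y => y == x)).count y := by
    conv_lhs => rw [← List.takeWhile_append_dropWhile (p := fun y => y == x) (l := xs)]
    rw [List.count_append, h1]
    omega
  rw [List.count_cons_of_ne (Ne.symm hne), hx]

-- in a sorted x :: xs, membership splits into the head and the tail past its run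
lemma mem_cons_iff_rest (x : Int) (xs : List Int) (z : Int) :
    z ∈ (x :: xs) ↔ z = x ∨ z ∈ xs.dropWhile (fun y => y == x) := by
  constructor
  · intro hz
    rcases List.mem_cons.mp hz with rfl | hz
    · exact Or.inl rfl
    · rw [← List.takeWhile_append_dropWhile (p := fun y => y == x) (l := xs),
        List.mem_append] at hz
      rcases hz with hz | hz
      · exact Or.inl (by simpa using List.mem_takeWhile_imp hz)
      · exact Or.inr hz
  · rintro (rfl | hz)
    · exact List.mem_cons_self
    · exact List.mem_cons_of_mem _ ((List.dropWhile_sublist _).mem hz)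

-- characterisation of B's run scan on a sorted list
lemma mem_runScan (a : List Int) (hp : a.Pairwise (· ≤ ·)) (x : Int) :
    x ∈ runScan a ↔ x ∈ a ∧ a.count x % 2 = 1 := by
  induction a using runScan.induct with
  | case1 => simp [runScan]
  | case2 h xs run rest hodd ih =>
    rw [List.pairwise_cons] at hp
    obtain ⟨hle, hpxs⟩ := hp
    have hprest : (xs.dropWhile (fun y => y == h)).Pairwise (· ≤ ·) :=
      hpxs.sublist (List.dropWhile_sublist _)
    have hcnt := count_head_run h xs hle hpxs
    have ihr : x ∈ runScan (xs.dropWhile (fun y => y == h))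
        ↔ x ∈ xs.dropWhile (fun y => y == h)
          ∧ (xs.dropWhile (fun y => y == h)).count x % 2 = 1 := ih hprest
    rw [runScan, if_pos hodd]
    rcases eq_or_ne x h with rfl | hxne
    · simp only [List.mem_cons, true_or, true_iff, true_and, hcnt]
      exact hodd
    · rw [List.mem_cons, or_iff_right hxne, ihr, mem_cons_iff_rest h xs x,
        or_iff_right hxne, count_other_run h x hxne xs]
  | case3 h xs run rest heven ih =>
    rw [List.pairwise_cons] at hp
    obtain ⟨hle, hpxs⟩ := hp
    have hprest : (xs.dropWhile (fun y => y == h)).Pairwise (· ≤ ·) :=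
      hpxs.sublist (List.dropWhile_sublist _)
    have hgt := rest_gt h xs hle hpxs
    have hcnt := count_head_run h xs hle hpxs
    have ihr : x ∈ runScan (xs.dropWhile (fun y => y == h))
        ↔ x ∈ xs.dropWhile (fun y => y == h)
          ∧ (xs.dropWhile (fun y => y == h)).count x % 2 = 1 := ih hprest
    rw [runScan, if_neg heven]
    rcases eq_or_ne x h with rfl | hxne
    · rw [ihr]
      have hxnr : x ∉ xs.dropWhile (fun y => y == x) := fun hc =>
        absurd rfl (ne_of_gt (hgt x hc))
      simp only [hxnr, false_and, false_iff, not_and]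
      intro hmem
      rw [hcnt]
      omega
    · rw [ihr, mem_cons_iff_rest h xs x, or_iff_right hxne, count_other_run h x hxne xs]

lemma pairwise_runScan (a : List Int) (hp : a.Pairwise (· ≤ ·)) :
    (runScan a).Pairwise (· < ·) := by
  induction a using runScan.induct with
  | case1 => simp [runScan]
  | case2 h xs run rest hodd ih =>
    rw [List.pairwise_cons] at hp
    obtain ⟨hle, hpxs⟩ := hp
    have hprest : (xs.dropWhile (fun y => y == h)).Pairwise (· ≤ ·) :=
      hpxs.sublist (List.dropWhile_sublist _)
    have hgt := rest_gt h xs hle hpxs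
    have ihr : (runScan (xs.dropWhile (fun y => y == h))).Pairwise (· < ·) := ih hprest
    rw [runScan, if_pos hodd, List.pairwise_cons]
    refine ⟨fun y hy => ?_, ihr⟩
    rw [mem_runScan _ hprest y] at hy
    exact hgt y hy.1
  | case3 h xs run rest heven ih =>
    rw [List.pairwise_cons] at hp
    obtain ⟨hle, hpxs⟩ := hp
    have hprest : (xs.dropWhile (fun y => y == h)).Pairwise (· ≤ ·) :=
      hpxs.sublist (List.dropWhile_sublist _)
    have ihr : (runScan (xs.dropWhile (fun y => y == h))).Pairwise (· < ·) := ih hprest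
    rw [runScan, if_neg heven]
    exact ihr

-- ===== VERDICT (by name: the statement is the Claim_ definition above) =====
theorem solve_spec : Claim_equal_solve := by
  intro N lists _ _
  unfold Spec_solve
  show solve N lists = solve_alt N lists
  simp only [solve, solve_alt]
  rw [counter_of_foldl]
  congr 1
  apply congrArg (fun l => List.map PySem.Int.toStr l)
  set s := PySem.List.sorted lists.flatten (fun x => x) false with hs
  have hps : s.Pairwise (· ≤ ·) := by
    simpa using PySem.List.sorted_pairwise lists.flatten (fun x => x)
  have hperm : s.Perm lists.flatten := PySem.List.sorted_perm lists.flatten _ _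
  have hpr := pairwise_runScan s hps
  apply PySem.List.sorted_eq_of_perm_of_pairwise_lt
  · -- (runScan s).Perm (A's set)
    have hAnd : ((PySem.Dict.counter lists.flatten).items.foldl
        (fun s kv => if PySem.Int.mod kv.2 2 ≠ 0 then PySem.Set.add s kv.1 else s)
        PySem.Set.empty).Nodup := by
      rw [PySem.Dict.items_counter, List.foldl_map]
      exact nodup_foldl_cond_add
        (fun k => PySem.Int.mod ((lists.flatten.count k : Nat) : Int) 2 ≠ 0) _ _ List.nodup_nil
    have hBnd : (runScan s).Nodup := hpr.imp ne_of_lt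
    rw [List.perm_ext_iff_of_nodup hBnd hAnd]
    intro x
    rw [mem_runScan s hps x, mem_A_set lists x, hperm.mem_iff, hperm.count_eq]
  · simpa using hpr
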